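-- pv_equiv track=rewrite | github.com/j-godinho/advent-of-code-2018 | 8/part2.py | recursive_read
-- ===== SOURCE A (Python) =====
-- def recursive_read(file):
-- 	childs, metadata = file[:2]
-- 	file = file[2:]
-- 	value = 0
-- 	scores = []
--
-- 	for i in range(childs):
-- 		total, file, score = recursive_read(file)
-- 		value += total
-- 		scores.append(score)
--
-- 	value += sum(file[:metadata])
--
-- 	if(childs == 0):
-- 		return value, file[metadata:], sum(file[:metadata])
-- 	else:
-- 		return value, file[metadata:], sum([scores[i-1] for i in file[:metadata] if i>0 and i<=len(scores)])
-- ===== SOURCE B (Python) =====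
-- def recursive_read(file):
--     tree, rest = _parse(file)
--     return _total(tree), rest, _value(tree)
--
-- def _parse(file):
--     childs, metadata = file[:2]
--     rest = file[2:]
--     kids = []
--     for _ in range(childs):
--         kid, rest = _parse(rest)
--         kids.append(kid)
--     return (childs, kids, rest[:metadata]), rest[metadata:]
--
-- def _total(tree):
--     childs, kids, meta = tree
--     return sum(_total(k) for k in kids) + sum(meta)
--
-- def _value(tree):
--     childs, kids, meta = tree
--     if childs == 0:
--         return sum(meta)
--     scores = [_value(k) for k in kids]
--     return sum(scores[i - 1] for i in meta if 0 < i <= len(scores))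
-- ===== Notes on version B (the rewrite author's own statement) =====
-- stated objective: alternative
-- what changed: A computes everything in one fused recursion over sliced tails; B first parses the flat list into an explicit tree (parse pass) and then computes the metadata total and the node value in two separate recursive passes over that tree.
import Mathlib
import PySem

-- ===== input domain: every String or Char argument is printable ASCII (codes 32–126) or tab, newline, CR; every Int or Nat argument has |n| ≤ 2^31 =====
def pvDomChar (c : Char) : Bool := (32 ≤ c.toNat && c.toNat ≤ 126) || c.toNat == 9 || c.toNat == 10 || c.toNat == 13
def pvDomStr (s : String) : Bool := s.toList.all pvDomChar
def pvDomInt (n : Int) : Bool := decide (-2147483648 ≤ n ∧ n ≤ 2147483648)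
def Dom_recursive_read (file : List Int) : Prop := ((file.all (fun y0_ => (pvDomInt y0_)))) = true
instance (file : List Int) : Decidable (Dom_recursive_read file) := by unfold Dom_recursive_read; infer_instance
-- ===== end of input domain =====

-- B replaces A's fused recursion over sliced tails by an explicit parse-to-tree pass
-- followed by two separate recursive passes (total and value) over the tree.

-- ===== PORT A =====
-- Fuel makes A's recursion total in Lean; file.length + 1 never runs out on inputs
-- where the Python returns (each recursion level consumes at least 2 elements).
def pvRunA : Nat → List Int → Int × List Int × Int
  | 0, _ => (0, [], 0)
  | fuel+1, file =>
    match file with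
    | c :: m :: f0 =>
      -- for i in range(childs): total, file, score = recursive_read(file); …
      let st := (PySem.List.pyRange 0 c 1).foldl
        (fun (st : Int × List Int × List Int) _ =>
          let r := pvRunA fuel st.2.1
          (st.1 + r.1, r.2.1, st.2.2 ++ [r.2.2]))
        (0, f0, [])
      let value := st.1 + (PySem.List.slice st.2.1 none (some m)).sum
      if c == 0 then
        (value, PySem.List.slice st.2.1 (some m) none,
          (PySem.List.slice st.2.1 none (some m)).sum)
      else
        (value, PySem.List.slice st.2.1 (some m) none,
          (((PySem.List.slice st.2.1 none (some m)).filter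
              (fun i => decide (0 < i) && decide (i ≤ (st.2.2.length : Int)))).map
            (fun i => (PySem.List.pyGet? st.2.2 (i - 1)).getD 0)).sum)
    | _ => (0, [], 0)

def recursive_read (file : List Int) : Int × List Int × Int :=
  pvRunA (file.length + 1) file

-- ===== PORT B =====
mutual
inductive PTree where
  | mk : Int → PKids → List Int → PTree
inductive PKids where
  | knil : PKids
  | kcons : PTree → PKids → PKids
end

mutual
def pvParse (fuel : Nat) (file : List Int) : PTree × List Int :=
  match fuel, file with
  | 0, _ => (PTree.mk 0 PKids.knil [], [])
  | fuel+1, file =>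
    match file with
    | c :: m :: f0 =>
      let r := pvParseKids fuel c.toNat f0
      (PTree.mk c r.1 (PySem.List.slice r.2 none (some m)),
       PySem.List.slice r.2 (some m) none)
    | _ => (PTree.mk 0 PKids.knil [], [])
  termination_by (fuel, 0)
def pvParseKids (fuel : Nat) (n : Nat) (file : List Int) : PKids × List Int :=
  match n with
  | 0 => (PKids.knil, file)
  | n+1 =>
    let r := pvParse fuel file
    let rs := pvParseKids fuel n r.2
    (PKids.kcons r.1 rs.1, rs.2)
  termination_by (fuel, n + 1)
end

mutual
def pvTotal : PTree → Int
  | PTree.mk _ kids md => pvTotalKids kids + md.sum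
def pvTotalKids : PKids → Int
  | PKids.knil => 0
  | PKids.kcons t ks => pvTotal t + pvTotalKids ks
end

mutual
def pvValue : PTree → Int
  | PTree.mk c kids md =>
    if c == 0 then md.sum
    else
      ((md.filter
          (fun i => decide (0 < i) && decide (i ≤ ((pvScores kids).length : Int)))).map
        (fun i => (PySem.List.pyGet? (pvScores kids) (i - 1)).getD 0)).sum
def pvScores : PKids → List Int
  | PKids.knil => []
  | PKids.kcons t ks => pvValue t :: pvScores ks
end

def recursive_read_alt (file : List Int) : Int × List Int × Int :=
  let r := pvParse (file.length + 1) file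
  (pvTotal r.1, r.2, pvValue r.1)

-- ===== PRECONDITION & SPEC =====
-- A raises ValueError exactly when some recursively visited node has fewer than 2
-- elements left for its header; well-formedness of a header-driven tree is inherently
-- this recursive shape condition on the input, so the checker below tracks only the
-- remaining input (no sums, no scores).  Its fuel file.length + 1 never runs out on
-- any input: every completed node consumes at least two elements, so the checker
-- answers none exactly where A's recursion meets a short header.
def pvOkN (fuel : Nat) (n : Nat) (file : List Int) : Option (List Int) :=
  match fuel with
  | 0 => none
  | fuel+1 =>
    match n with
    | 0 => some file
    | n+1 =>
      match file with
      | c :: m :: rest =>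
        match pvOkN fuel c.toNat rest with
        | none => none
        | some f => pvOkN fuel n (PySem.List.slice f (some m) none)
      | _ => none

def Pre_recursive_read (file : List Int) : Prop := (pvOkN (file.length + 1) 1 file).isSome = true
instance (file : List Int) : Decidable (Pre_recursive_read file) := by
  unfold Pre_recursive_read; infer_instance

def pvWitness_recursive_read : List Int := [2, 3, 0, 3, 10, 11, 12, 1, 1, 0, 1, 99, 2, 1, 1, 2]

def Spec_recursive_read (file : List Int) (out : Int × List Int × Int) : Prop := out = recursive_read_alt file
instance (file : List Int) (out : Int × List Int × Int) : Decidable (Spec_recursive_read file out) := by unfold Spec_recursive_read; infer_instance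

-- ===== CLAIM (what is proved, stated in full; the proofs are below) =====
def Claim_equal_recursive_read : Prop := ∀ (file : List Int), Dom_recursive_read file → Pre_recursive_read file → Spec_recursive_read file (recursive_read file)

-- ===== LEMMAS AND PROOFS =====

-- B's composed result, as a function of the fuel, to state the bridge lemma.
def pvRunB (fuel : Nat) (file : List Int) : Int × List Int × Int :=
  let r := pvParse fuel file
  (pvTotal r.1, r.2, pvValue r.1)

theorem pvLoop_eq (fuel : Nat)
    (IH : ∀ x, pvRunA fuel x = pvRunB fuel x) :
    ∀ (l : List Int) (f0 : List Int) (v : Int) (scs : List Int),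
      l.foldl
        (fun (st : Int × List Int × List Int) _ =>
          let r := pvRunA fuel st.2.1
          (st.1 + r.1, r.2.1, st.2.2 ++ [r.2.2]))
        (v, f0, scs)
      = (v + pvTotalKids (pvParseKids fuel l.length f0).1,
         (pvParseKids fuel l.length f0).2,
         scs ++ pvScores (pvParseKids fuel l.length f0).1) := by
  intro l
  induction l with
  | nil =>
    intro f0 v scs
    simp [pvParseKids, pvTotalKids, pvScores]
  | cons a l ih =>
    intro f0 v scs
    simp only [List.foldl_cons]
    rw [IH f0]
    simp only [pvRunB]
    rw [ih]
    simp only [List.length_cons, pvParseKids, pvTotalKids, pvScores]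
    simp only [Prod.mk.injEq]
    exact ⟨by ring, by simp, by simp⟩

theorem pvRunA_eq_pvRunB : ∀ (fuel : Nat) (file : List Int), pvRunA fuel file = pvRunB fuel file := by
  intro fuel
  induction fuel with
  | zero =>
    intro file
    simp [pvRunA, pvRunB, pvParse, pvTotal, pvTotalKids, pvValue]
  | succ fuel ih =>
    intro file
    match file with
    | [] => simp [pvRunA, pvRunB, pvParse, pvTotal, pvTotalKids, pvValue]
    | [c] => simp [pvRunA, pvRunB, pvParse, pvTotal, pvTotalKids, pvValue]
    | c :: m :: f0 =>
      show pvRunA (fuel+1) (c :: m :: f0) = pvRunB (fuel+1) (c :: m :: f0)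
      rw [pvRunA, pvRunB, pvParse]
      simp only []
      rw [pvLoop_eq fuel ih _ f0 0 []]
      rw [PySem.List.length_pyRange_one]
      simp only [Int.sub_zero]
      by_cases hc : c = 0
      · subst hc
        simp [pvTotal, pvValue]
      · rw [if_neg (by simpa using hc)]
        simp only [pvTotal, pvValue]
        rw [if_neg (by simpa using hc)]
        refine congrArg (fun x => (x, _, _)) ?_
        ring

-- ===== VERDICT (by name: the statement is the Claim_ definition above) =====
theorem recursive_read_spec : Claim_equal_recursive_read := by
  intro file _ _
  unfold Spec_recursive_read recursive_read recursive_read_alt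
  rw [pvRunA_eq_pvRunB]
  rfl
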